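-- pv_equiv track=rewrite | github.com/Wulfic/Cicada3301 | Tools/p20_comprehensive_attack.py | diagonal_read
-- ===== SOURCE A (Python) =====
-- def diagonal_read(data, width, step=1):
--     """Read diagonally with given step"""
--     if len(data) % width != 0:
--         return None
--     height = len(data) // width
--     result = []
--
--     for start_c in range(width):
--         r, c = 0, start_c
--         while r < height:
--             result.append(data[r * width + c])
--             r += 1
--             c = (c + step) % width
--
--     return result
-- ===== SOURCE B (Python) =====
-- def diagonal_read(data, width, step=1):
--     """Read diagonally with given step (scatter: each input cell is sent to its output slot)"""
--     if len(data) % width != 0: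
--         return None
--     height = len(data) // width
--     result = [0] * len(data)
--     for r in range(height):
--         for c in range(width):
--             result[((c - r * step) % width) * height + r] = data[r * width + c]
--     return result
-- ===== Notes on version B (the rewrite author's own statement) =====
-- stated objective: alternative
-- what changed: Replaces A's per-diagonal gather (outer loop over start columns, inner while walking down each wrapped diagonal appending to the result) by a single row-major pass over the input that scatters each element data[r*width+c] into a preallocated buffer at slot ((c - r*step) % width)*height + r, the inverse of the diagonal map.
-- outside the precondition, e.g. on diagonal_read([1, 2], -2, 1): A returns [], B returns [0, 0]; on diagonal_read([1], 0, 1): A raises ZeroDivisionError, B raises ZeroDivisionError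
import Mathlib
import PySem

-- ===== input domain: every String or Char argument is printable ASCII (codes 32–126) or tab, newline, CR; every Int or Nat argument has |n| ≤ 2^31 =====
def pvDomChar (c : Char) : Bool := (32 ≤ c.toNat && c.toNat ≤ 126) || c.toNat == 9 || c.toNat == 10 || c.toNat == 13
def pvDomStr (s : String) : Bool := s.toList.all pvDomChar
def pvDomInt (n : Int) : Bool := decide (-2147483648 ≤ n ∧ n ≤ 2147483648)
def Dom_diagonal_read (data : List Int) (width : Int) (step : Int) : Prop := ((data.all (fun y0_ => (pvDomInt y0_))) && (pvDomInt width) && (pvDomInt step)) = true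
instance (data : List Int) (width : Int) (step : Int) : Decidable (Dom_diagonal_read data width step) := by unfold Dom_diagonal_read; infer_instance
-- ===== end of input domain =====

-- B scatters each input cell to its output slot in one row-major pass (inverse diagonal map),
-- instead of A's gather of each wrapped diagonal; alternative decomposition, same cost.
-- Pre_ excludes width = 0 (ZeroDivisionError in both) and negative widths dividing a nonempty
-- length, where A's empty result is an artefact of range(width) being empty.


-- ===== PORT A =====
-- inner 'while r < height' loop: append data[r*width+c], advance r and c.
-- data[r*width+c] is ported as pyGetD … 0: whenever the loop runs under Pre_ (width > 0),
-- the index is in range, so Python never raises here (the equivalence proof shows the bounds).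
def diagonal_read_Aloop (data : List Int) (width : Int) (step : Int) (height : Int)
    (r : Int) (c : Int) (res : List Int) : List Int :=
  if _h : r < height then
    diagonal_read_Aloop data width step height (r + 1) (PySem.Int.mod (c + step) width)
      (res ++ [PySem.List.pyGetD data (r * width + c) 0])
  else res
termination_by (height - r).toNat
decreasing_by omega

def diagonal_read (data : List Int) (width : Int) (step : Int) : Option (List Int) :=
  if PySem.Int.mod (data.length : Int) width ≠ 0 then none
  else
    let height := PySem.Int.floordiv (data.length : Int) width
    some ((PySem.List.pyRange 0 width 1).foldl
      (fun res start_c => diagonal_read_Aloop data width step height 0 start_c res) [])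

-- ===== PORT B =====
-- scatter: result[((c - r*step) % width)*height + r] = data[r*width + c], row-major pass;
-- both the read (pyGetD … 0) and the write (pySetD) are in range whenever the loops run
-- under Pre_ (width > 0), so Python never raises here.
def diagonal_read_alt (data : List Int) (width : Int) (step : Int) : Option (List Int) :=
  if PySem.Int.mod (data.length : Int) width ≠ 0 then none
  else
    let height := PySem.Int.floordiv (data.length : Int) width
    some ((PySem.List.pyRange 0 height 1).foldl
      (fun res r => (PySem.List.pyRange 0 width 1).foldl
        (fun res c => PySem.List.pySetD res
          (PySem.Int.mod (c - r * step) width * height + r)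
          (PySem.List.pyGetD data (r * width + c) 0)) res)
      (List.replicate data.length 0))

-- ===== PRECONDITION & SPEC =====
-- Pre_ excludes width = 0, where Python raises ZeroDivisionError in both programs, and
-- negative widths dividing a nonempty length, where A returns [] only because range(width)
-- is empty — an artefact of A's gather loop; B naturally returns the untouched buffer there.
def Pre_diagonal_read (data : List Int) (width : Int) (step : Int) : Prop :=
  0 < width ∨ (width ≠ 0 ∧ (data = [] ∨ PySem.Int.mod (data.length : Int) width ≠ 0))
instance (data : List Int) (width : Int) (step : Int) : Decidable (Pre_diagonal_read data width step) := by unfold Pre_diagonal_read; infer_instance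

def pvWitness_diagonal_read : List Int × Int × Int := ([1, 2, 3, 4, 5, 6], 2, 1)

def Spec_diagonal_read (data : List Int) (width : Int) (step : Int) (out : Option (List Int)) : Prop := out = diagonal_read_alt data width step
instance (data : List Int) (width : Int) (step : Int) (out : Option (List Int)) : Decidable (Spec_diagonal_read data width step out) := by unfold Spec_diagonal_read; infer_instance

-- ===== CLAIM (what is proved, stated in full; the proofs are below) =====
def Claim_equal_diagonal_read : Prop := ∀ (data : List Int) (width : Int) (step : Int), Dom_diagonal_read data width step → Pre_diagonal_read data width step → Spec_diagonal_read data width step (diagonal_read data width step)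

-- ===== LEMMAS AND PROOFS =====

-- generic: length of a flatMap whose blocks all have length H
theorem pvLength_flatMap_uniform {α β : Type} (L : List α) (g : α → List β) (H : Nat)
    (hg : ∀ x ∈ L, (g x).length = H) : (L.flatMap g).length = L.length * H := by
  induction L with
  | nil => simp
  | cons x L ih =>
      simp only [List.flatMap_cons, List.length_append, List.length_cons]
      rw [hg x (by simp), ih (fun y hy => hg y (by simp [hy]))]
      ring

-- generic: indexing a flatMap whose blocks all have length H
theorem pvGetElem?_flatMap_uniform {α β : Type} (L : List α) (g : α → List β) (H : Nat)
    (hH : 0 < H) (hg : ∀ x ∈ L, (g x).length = H) (j : Nat) :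
    (L.flatMap g)[j]? = L[j / H]?.bind (fun x => (g x)[j % H]?) := by
  induction L generalizing j with
  | nil => simp
  | cons x L ih =>
      simp only [List.flatMap_cons]
      by_cases hj : j < H
      · rw [List.getElem?_append_left (by rw [hg x (by simp)]; exact hj)]
        rw [Nat.div_eq_of_lt hj, Nat.mod_eq_of_lt hj]
        simp
      · push Not at hj
        rw [List.getElem?_append_right (by rw [hg x (by simp)]; exact hj)]
        rw [hg x (by simp)]
        rw [ih (fun y hy => hg y (by simp [hy])) (j - H)]
        obtain ⟨j', rfl⟩ : ∃ j', j = H + j' := ⟨j - H, by omega⟩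
        have h1 : (H + j') / H = j' / H + 1 := by
          rw [Nat.add_comm]; exact Nat.add_div_right j' hH
        have h2 : (H + j') % H = j' % H := Nat.add_mod_left H j'
        simp [h1, h2]

-- generic: a nested foldl over two lists is a foldl over the list of index pairs
theorem pvFoldl_foldl_eq_pairs {α β γ : Type} (rows : List α) (cols : List β)
    (g : γ → α → β → γ) (init : γ) :
    rows.foldl (fun acc r => cols.foldl (fun acc c => g acc r c) acc) init =
      (rows.flatMap (fun r => cols.map (fun c => (r, c)))).foldl (fun acc p => g acc p.1 p.2) init := by
  induction rows generalizing init with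
  | nil => simp
  | cons r rows ih =>
      simp only [List.flatMap_cons, List.foldl_append, List.foldl_cons, List.foldl_map]
      rw [ih]

-- generic: a fold of in-range writes preserves the length
theorem pvLength_foldl_set {α β : Type} (ps : List β) (idx : β → Nat) (val : β → α)
    (init : List α) :
    (ps.foldl (fun acc p => acc.set (idx p) (val p)) init).length = init.length := by
  induction ps generalizing init with
  | nil => rfl
  | cons p ps ih => simp [List.foldl_cons, ih]

-- generic: a slot no write targets keeps its initial value
theorem pvGetElem?_foldl_set_of_ne {α β : Type} (ps : List β) (idx : β → Nat) (val : β → α)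
    (init : List α) (j : Nat) (h : ∀ p ∈ ps, idx p ≠ j) :
    (ps.foldl (fun acc p => acc.set (idx p) (val p)) init)[j]? = init[j]? := by
  induction ps generalizing init with
  | nil => rfl
  | cons p ps ih =>
      rw [List.foldl_cons, ih _ (fun q hq => h q (by simp [hq]))]
      rw [List.getElem?_set_ne (h p (by simp))]

-- generic: if every write to slot j writes v and some write targets j, the fold leaves v at j
theorem pvGetElem?_foldl_set {α β : Type} (ps : List β) (idx : β → Nat) (val : β → α)
    (init : List α) (j : Nat) (hj : j < init.length) (v : α)
    (hex : ∃ p ∈ ps, idx p = j) (hval : ∀ p ∈ ps, idx p = j → val p = v) :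
    (ps.foldl (fun acc p => acc.set (idx p) (val p)) init)[j]? = some v := by
  induction ps generalizing init with
  | nil => simp at hex
  | cons p ps ih =>
      rw [List.foldl_cons]
      by_cases hmem : ∃ q ∈ ps, idx q = j
      · exact ih _ (by simpa using hj) hmem (fun q hq => hval q (by simp [hq]))
      · push Not at hmem
        have hp : idx p = j := by
          obtain ⟨q, hq, hqj⟩ := hex
          rcases List.mem_cons.1 hq with rfl | hq
          · exact hqj
          · exact absurd hqj (hmem q hq)
        rw [pvGetElem?_foldl_set_of_ne _ _ _ _ _ hmem, hp,
          List.getElem?_set_self (by simpa using hj)]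
        rw [hval p (by simp) hp]

-- A's inner while loop appends one wrapped diagonal
theorem pvAloop_eq (data : List Int) (width step height : Int) (hw : 0 < width) :
    ∀ (n : Nat) (r c : Int) (res : List Int), (height - r).toNat = n → c % width = c →
    diagonal_read_Aloop data width step height r c res =
      res ++ (List.range n).map
        (fun (k : Nat) => PySem.List.pyGetD data ((r + (k : Int)) * width + (c + (k : Int) * step) % width) 0) := by
  intro n
  induction n with
  | zero =>
      intro r c res hn _
      rw [diagonal_read_Aloop, dif_neg (by omega)]
      simp
  | succ n ih =>
      intro r c res hn hc
      rw [diagonal_read_Aloop, dif_pos (by omega), PySem.Int.mod_eq_emod_of_pos hw,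
        ih (r + 1) ((c + step) % width) _ (by omega) (Int.emod_emod_of_dvd _ dvd_rfl),
        List.append_assoc, List.singleton_append,
        List.range_succ_eq_map (n := n)]
      simp only [List.map_cons, List.map_map]
      congr 1
      congr 1
      · simp [hc]
      · apply List.map_congr_left
        intro k _
        simp only [Function.comp]
        congr 2
        · push_cast; ring
        · rw [Int.emod_add_emod]
          congr 1
          push_cast; ring

-- main case: the two loop nests build the same list when width > 0 and width ∣ len
theorem pvMain (data : List Int) (width step : Int) (hw : 0 < width)
    (hmod : PySem.Int.mod (data.length : Int) width = 0) :
    (PySem.List.pyRange 0 width 1).foldl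
      (fun res sc => diagonal_read_Aloop data width step
        (PySem.Int.floordiv (data.length : Int) width) 0 sc res) [] =
    (PySem.List.pyRange 0 (PySem.Int.floordiv (data.length : Int) width) 1).foldl
      (fun res r => (PySem.List.pyRange 0 width 1).foldl
        (fun res c => PySem.List.pySetD res
          (PySem.Int.mod (c - r * step) width * (PySem.Int.floordiv (data.length : Int) width) + r)
          (PySem.List.pyGetD data (r * width + c) 0)) res)
      (List.replicate data.length 0) := by
  rw [PySem.Int.floordiv_eq_ediv_of_pos hw]
  have hmodE : (data.length : Int) % width = 0 := by
    rw [← PySem.Int.mod_eq_emod_of_pos hw]; exact hmod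
  set H : Int := (data.length : Int) / width with hH
  have hH0 : 0 ≤ H := Int.ediv_nonneg (by positivity) (le_of_lt hw)
  have hLen : (data.length : Int) = H * width :=
    (Int.ediv_mul_cancel (Int.dvd_of_emod_eq_zero hmodE)).symm
  set Hn := H.toNat with hHn
  set wn := width.toNat with hwn
  have hwcast : (wn : Int) = width := Int.toNat_of_nonneg (le_of_lt hw)
  have hHcast : (Hn : Int) = H := Int.toNat_of_nonneg hH0
  have hlen : data.length = wn * Hn := by
    have h1 : ((data.length : Nat) : Int) = ((wn * Hn : Nat) : Int) := by
      push_cast; rw [hwcast, hHcast]; linarith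
    exact_mod_cast h1
  -- A side: foldl of appended diagonal blocks = flatMap of the blocks
  have hA : (PySem.List.pyRange 0 width 1).foldl
      (fun res sc => diagonal_read_Aloop data width step H 0 sc res) [] =
      (PySem.List.pyRange 0 width 1).flatMap (fun sc => (List.range Hn).map
        (fun (k : Nat) => PySem.List.pyGetD data ((k : Int) * width + (sc + (k : Int) * step) % width) 0)) := by
    rw [PySem.List.foldl_congr_mem _ _
      (fun res sc => res ++ (List.range Hn).map
        (fun (k : Nat) => PySem.List.pyGetD data ((k : Int) * width + (sc + (k : Int) * step) % width) 0)) _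
      ?_]
    · rw [PySem.List.foldl_append_eq_flatMap, List.nil_append]
    · intro acc sc hsc
      obtain ⟨hsc1, hsc2⟩ := PySem.List.mem_pyRange_one.1 hsc
      rw [pvAloop_eq data width step H hw Hn 0 sc acc (by omega) (Int.emod_eq_of_lt hsc1 hsc2)]
      simp only [zero_add]
  -- B side: nested foldl = one fold of writes over the pair list
  have hB : (PySem.List.pyRange 0 H 1).foldl
      (fun res r => (PySem.List.pyRange 0 width 1).foldl
        (fun res c => PySem.List.pySetD res
          (PySem.Int.mod (c - r * step) width * H + r)
          (PySem.List.pyGetD data (r * width + c) 0)) res)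
      (List.replicate data.length 0) =
      ((PySem.List.pyRange 0 H 1).flatMap
        (fun r => (PySem.List.pyRange 0 width 1).map (fun c => (r, c)))).foldl
        (fun acc p => acc.set ((p.2 - p.1 * step) % width * H + p.1).toNat
          (PySem.List.pyGetD data (p.1 * width + p.2) 0))
        (List.replicate data.length 0) := by
    rw [pvFoldl_foldl_eq_pairs]
    apply PySem.List.foldl_congr_mem
    intro acc p hp
    obtain ⟨r, hr, hp2⟩ := List.mem_flatMap.1 hp
    obtain ⟨c, hc, rfl⟩ := List.mem_map.1 hp2
    obtain ⟨hr1, hr2⟩ := PySem.List.mem_pyRange_one.1 hr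
    obtain ⟨hc1, hc2⟩ := PySem.List.mem_pyRange_one.1 hc
    rw [PySem.Int.mod_eq_emod_of_pos hw, PySem.List.pySetD_of_nonneg]
    have hm0 : 0 ≤ (c - r * step) % width := Int.emod_nonneg _ (ne_of_gt hw)
    have hmul : 0 ≤ (c - r * step) % width * H := mul_nonneg hm0 hH0
    linarith
  rw [hA, hB]
  apply List.ext_getElem?
  intro j
  have hgA : ∀ sc ∈ PySem.List.pyRange 0 width 1,
      ((List.range Hn).map (fun (k : Nat) =>
        PySem.List.pyGetD data ((k : Int) * width + (sc + (k : Int) * step) % width) 0)).length = Hn := by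
    intro sc _; simp
  by_cases hj : j < wn * Hn
  · have hHn0 : 0 < Hn := by
      rcases Nat.eq_zero_or_pos Hn with h | h
      · rw [h] at hj; simp at hj
      · exact h
    have hjd : j / Hn < wn := Nat.div_lt_of_lt_mul (Nat.mul_comm wn Hn ▸ hj)
    have hjm : j % Hn < Hn := Nat.mod_lt j hHn0
    -- evaluate the A side at j
    rw [pvGetElem?_flatMap_uniform _ _ Hn hHn0 hgA j, PySem.List.getElem?_pyRange_one,
      if_pos (by rw [show (width - 0).toNat = wn by omega]; exact hjd)]
    simp only [Option.bind_some, zero_add, List.getElem?_map, List.getElem?_range hjm,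
      Option.map_some]
    -- evaluate the B side at j
    rw [pvGetElem?_foldl_set _ _ _ _ j (by rw [List.length_replicate, hlen]; exact hj)
      (PySem.List.pyGetD data (((j % Hn : Nat) : Int) * width +
        (((j / Hn : Nat) : Int) + ((j % Hn : Nat) : Int) * step) % width) 0) ?hex ?hval]
    case hex =>
      refine ⟨(((j % Hn : Nat) : Int),
        (((j / Hn : Nat) : Int) + ((j % Hn : Nat) : Int) * step) % width), ?_, ?_⟩
      · refine List.mem_flatMap.2 ⟨((j % Hn : Nat) : Int), PySem.List.mem_pyRange_one.2
          ⟨by positivity, by rw [← hHcast]; exact_mod_cast hjm⟩, List.mem_map.2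
          ⟨(((j / Hn : Nat) : Int) + ((j % Hn : Nat) : Int) * step) % width,
            PySem.List.mem_pyRange_one.2
              ⟨Int.emod_nonneg _ (ne_of_gt hw), Int.emod_lt_of_pos _ hw⟩, rfl⟩⟩
      · have hm : ((((j / Hn : Nat) : Int) + ((j % Hn : Nat) : Int) * step) % width
            - ((j % Hn : Nat) : Int) * step) % width = ((j / Hn : Nat) : Int) := by
          rw [sub_eq_add_neg, Int.emod_add_emod]
          have harith : ((j / Hn : Nat) : Int) + ((j % Hn : Nat) : Int) * step +
              -(((j % Hn : Nat) : Int) * step) = ((j / Hn : Nat) : Int) := by ring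
          rw [harith, Int.emod_eq_of_lt (by positivity) (by rw [← hwcast]; exact_mod_cast hjd)]
        simp only [hm]
        have hv : ((j / Hn : Nat) : Int) * H + ((j % Hn : Nat) : Int) = (j : Int) := by
          rw [← hHcast]
          have hnat : ((Hn : Int)) * ((j / Hn : Nat) : Int) + ((j % Hn : Nat) : Int) = (j : Int) := by
            exact_mod_cast Nat.div_add_mod j Hn
          linarith
        rw [hv, Int.toNat_natCast]
    case hval =>
      intro p hp hpj
      obtain ⟨r, hr, hp2⟩ := List.mem_flatMap.1 hp
      obtain ⟨c, hc, rfl⟩ := List.mem_map.1 hp2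
      obtain ⟨hr1, hr2⟩ := PySem.List.mem_pyRange_one.1 hr
      obtain ⟨hc1, hc2⟩ := PySem.List.mem_pyRange_one.1 hc
      simp only at hpj ⊢
      set m' : Int := (c - r * step) % width with hm'
      have hm0 : 0 ≤ m' := Int.emod_nonneg _ (ne_of_gt hw)
      have hm1 : m' < width := Int.emod_lt_of_pos _ hw
      have hjint : m' * H + r = (j : Int) := by
        have h0 : 0 ≤ m' * H + r := by
          have := mul_nonneg hm0 hH0; linarith
        have h1 := Int.toNat_of_nonneg h0
        rw [← h1, hpj]
      have hHpos : (0 : Int) < H := by omega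
      have huniq : (j : Int) / H = m' ∧ (j : Int) % H = r :=
        (Int.ediv_emod_unique hHpos).2 ⟨by linarith [hjint], hr1, hr2⟩
      have hdivcast : ((j / Hn : Nat) : Int) = (j : Int) / H := by
        rw [← hHcast]; push_cast; ring
      have hmodcast : ((j % Hn : Nat) : Int) = (j : Int) % H := by
        rw [← hHcast]; push_cast; ring
      have hrr : r = ((j % Hn : Nat) : Int) := by rw [hmodcast, huniq.2]
      have hmval : m' = ((j / Hn : Nat) : Int) := by rw [hdivcast, huniq.1]
      have hcc : c = (((j / Hn : Nat) : Int) + ((j % Hn : Nat) : Int) * step) % width := by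
        have h5 : c % width = c := Int.emod_eq_of_lt hc1 hc2
        calc c = c % width := h5.symm
          _ = ((c - r * step) % width + r * step) % width := by
              rw [Int.emod_add_emod]; congr 1; ring
          _ = (((j / Hn : Nat) : Int) + ((j % Hn : Nat) : Int) * step) % width := by
              rw [← hm', hmval, hrr]
      rw [hrr, hcc]
  · rw [List.getElem?_eq_none, List.getElem?_eq_none]
    · rw [pvLength_foldl_set, List.length_replicate, hlen]; exact Nat.le_of_not_lt hj
    · rw [pvLength_flatMap_uniform _ _ Hn hgA, PySem.List.length_pyRange_one,
        show (width - 0).toNat = wn by omega]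
      exact Nat.le_of_not_lt hj

-- ===== VERDICT (by name: the statement is the Claim_ definition above) =====
theorem diagonal_read_spec : Claim_equal_diagonal_read := by
  intro data width step _ hpre
  unfold Spec_diagonal_read diagonal_read diagonal_read_alt
  by_cases hmod : PySem.Int.mod (data.length : Int) width ≠ 0
  · rw [if_pos hmod, if_pos hmod]
  · rw [if_neg hmod, if_neg hmod]
    push Not at hmod
    by_cases hw : 0 < width
    · exact congrArg some (pvMain data width step hw hmod)
    · have hdata : data = [] := by
        rcases hpre with h | ⟨_, h | h⟩
        · exact absurd h hw
        · exact h
        · exact absurd hmod h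
      have hwneg : width < 0 := by
        rcases hpre with h | ⟨h0, _⟩
        · exact absurd h hw
        · omega
      subst hdata
      have h0 : PySem.Int.floordiv ((List.length ([] : List Int) : Int)) width = 0 := by
        have := PySem.Int.floordiv_mul_add_mod ((List.length ([] : List Int) : Int)) width
        simp only [List.length_nil, Nat.cast_zero] at this hmod ⊢
        rw [hmod, add_zero] at this
        rcases lt_trichotomy (PySem.Int.floordiv 0 width) 0 with h | h | h
        · nlinarith
        · exact h
        · nlinarith
      rw [h0]
      simp [PySem.List.pyRange_one_eq_nil (le_of_lt hwneg), PySem.List.pyRange_one_eq_nil (le_refl (0 : Int))]
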